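-- pv_equiv track=rewrite | github.com/polirritmico/codesignal_solutions | Python/The Core/stringsConstruction.py | solution
-- ===== SOURCE A (Python) =====
-- def solution(target_str, letters_to_use):
--     letters_counter = {}
--     for char in letters_to_use:
--         letters_counter[char] = letters_counter.get(char, 0) + 1
--     target_letters = {}
--     for char in target_str:
--         target_letters[char] = target_letters.get(char, 0) + 1
--
--     constructed_targets_counter = 0
--
--     while True:
--         for char in target_str:
--             if char not in letters_counter:
--                 return constructed_targets_counter
--             letters_counter[char] -= 1
--             if letters_counter[char] == 0:
--                 del letters_counter[char]
--         constructed_targets_counter += 1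
-- ===== SOURCE B (Python) =====
-- def solution(target_str, letters_to_use):
--     return min(letters_to_use.count(c) // target_str.count(c) for c in set(target_str))
-- ===== Notes on version B (the rewrite author's own statement) =====
-- stated objective: faster
-- what changed: A simulates building copies one by one, decrementing a letter-count dict per character until some letter runs out; B computes the answer in closed form as min over the distinct target characters of available_count // needed_count.
import Mathlib
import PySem

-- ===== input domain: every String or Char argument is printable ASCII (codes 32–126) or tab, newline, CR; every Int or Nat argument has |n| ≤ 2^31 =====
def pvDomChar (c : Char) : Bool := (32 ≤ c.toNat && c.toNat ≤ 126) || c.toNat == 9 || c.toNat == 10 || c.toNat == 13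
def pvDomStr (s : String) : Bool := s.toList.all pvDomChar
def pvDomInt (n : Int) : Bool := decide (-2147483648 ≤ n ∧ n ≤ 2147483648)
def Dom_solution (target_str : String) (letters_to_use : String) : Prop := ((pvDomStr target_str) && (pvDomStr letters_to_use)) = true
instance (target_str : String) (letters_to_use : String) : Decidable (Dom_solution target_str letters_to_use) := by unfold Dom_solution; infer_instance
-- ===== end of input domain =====

-- B replaces A's copy-by-copy simulation with the closed form: min over the distinct
-- target characters of available_count // needed_count.


-- ===== PORT A =====
-- the counting loop "d[char] = d.get(char, 0) + 1"
def pvBuildCounter (s : List Char) : PySem.Dict Char Int :=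
  s.foldl (fun d c => d.insert c (d.getD c 0 + 1)) PySem.Dict.empty

-- one pass of the inner "for char in target_str" loop; none = the early "return"
def pvPassA : List Char → PySem.Dict Char Int → Option (PySem.Dict Char Int)
  | [], d => some d
  | c :: rest, d =>
    match d.get? c with
    | none => none                      -- "if char not in letters_counter: return …"
    | some v =>                          -- "letters_counter[char] -= 1; if == 0: del"
      pvPassA rest (if v - 1 = 0 then d.erase c else d.insert c (v - 1))

-- the "while True" loop; fuel |letters|+1 provably exceeds the number of passes (pvLoopA_eq below)
def pvLoopA : Nat → List Char → PySem.Dict Char Int → Int → Int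
  | 0, _, _, acc => acc
  | fuel + 1, t, d, acc =>
    match pvPassA t d with
    | none => acc
    | some d' => pvLoopA fuel t d' (acc + 1)

def solution (target_str : String) (letters_to_use : String) : Int :=
  let letters_counter := pvBuildCounter letters_to_use.toList
  let _target_letters := pvBuildCounter target_str.toList   -- built by A, never read
  pvLoopA (letters_to_use.toList.length + 1) target_str.toList letters_counter 0

-- ===== PORT B =====
def solution_alt (target_str : String) (letters_to_use : String) : Int :=
  let qs := (PySem.Set.ofList target_str.toList).map
    (fun c => PySem.Int.floordiv (letters_to_use.toList.count c : Int) (target_str.toList.count c : Int))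
  match qs with
  | [] => 0                             -- unreachable under Pre_: Python's min raises on an empty target
  | q :: rest => rest.foldl min q

-- ===== PRECONDITION & SPEC =====
-- Pre_ excludes only target_str = "": there A never returns (the while-loop runs forever) and B raises ValueError.
def Pre_solution (target_str : String) (letters_to_use : String) : Prop := target_str ≠ ""
instance (target_str : String) (letters_to_use : String) : Decidable (Pre_solution target_str letters_to_use) := by unfold Pre_solution; infer_instance
def pvWitness_solution : String × String := ("ab", "aabba")

def Spec_solution (target_str : String) (letters_to_use : String) (out : Int) : Prop := out = solution_alt target_str letters_to_use
instance (target_str : String) (letters_to_use : String) (out : Int) : Decidable (Spec_solution target_str letters_to_use out) := by unfold Spec_solution; infer_instance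

-- ===== CLAIM (what is proved, stated in full; the proofs are below) =====
def Claim_equal_solution : Prop := ∀ (target_str : String) (letters_to_use : String), Dom_solution target_str letters_to_use → Pre_solution target_str letters_to_use → Spec_solution target_str letters_to_use (solution target_str letters_to_use)

-- ===== LEMMAS AND PROOFS =====

-- invariant: all values stored in the letters counter are positive
def pvGood (d : PySem.Dict Char Int) : Prop := ∀ c v, d.get? c = some v → 0 < v

theorem pvGet?_erase (d : PySem.Dict Char Int) (k k' : Char) :
    (d.erase k).get? k' = if k' = k then none else d.get? k' := by
  obtain ⟨items⟩ := d
  simp only [PySem.Dict.erase, PySem.Dict.get?]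
  split_ifs with h
  · subst h
    rw [List.find?_eq_none.2]
    · rfl
    · intro p hp
      simp at hp ⊢
      exact hp.2
  · rw [List.find?_filter]
    congr 2
    funext a
    by_cases ha : a.1 = k' <;> simp [ha, h]

theorem pvGetD_erase (d : PySem.Dict Char Int) (k k' : Char) :
    (d.erase k).getD k' 0 = if k' = k then 0 else d.getD k' 0 := by
  simp only [PySem.Dict.getD, pvGet?_erase]
  split_ifs <;> rfl

theorem pvGood_getD_nonneg {d : PySem.Dict Char Int} (hg : pvGood d) (c : Char) :
    0 ≤ d.getD c 0 := by
  simp only [PySem.Dict.getD]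
  cases h : d.get? c with
  | none => simp
  | some v => exact le_of_lt (by simpa using hg c v h)

theorem pvGood_get?_of_pos {d : PySem.Dict Char Int} (hg : pvGood d) {c : Char}
    (h : 0 < d.getD c 0) : d.get? c = some (d.getD c 0) := by
  cases hc : d.get? c with
  | none => simp [PySem.Dict.getD, hc] at h
  | some v => simp [PySem.Dict.getD, hc]

theorem pvStep_getD {d : PySem.Dict Char Int} {c : Char} (v : Int) (a : Char) :
    ((if v - 1 = 0 then d.erase c else d.insert c (v - 1)).getD a 0)
      = if a = c then v - 1 else d.getD a 0 := by
  by_cases h2 : a = c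
  · subst h2
    rw [if_pos rfl]
    by_cases h1 : v - 1 = 0
    · rw [if_pos h1, pvGetD_erase, if_pos rfl]; omega
    · rw [if_neg h1, PySem.Dict.getD_insert, if_pos rfl]
  · rw [if_neg h2]
    by_cases h1 : v - 1 = 0
    · rw [if_pos h1, pvGetD_erase, if_neg h2]
    · rw [if_neg h1, PySem.Dict.getD_insert, if_neg h2]

theorem pvStep_good {d : PySem.Dict Char Int} {c : Char} {v : Int}
    (hg : pvGood d) (hv : d.get? c = some v) :
    pvGood (if v - 1 = 0 then d.erase c else d.insert c (v - 1)) := by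
  intro a w hw
  split_ifs at hw with h1
  · rw [pvGet?_erase] at hw
    split_ifs at hw
    exact hg a w hw
  · rw [PySem.Dict.get?_insert] at hw
    split_ifs at hw with h2
    · have h0 : 0 < v := hg c v hv
      have : w = v - 1 := by simpa using hw.symm
      omega
    · exact hg a w hw

theorem pvPassA_some (t : List Char) (d : PySem.Dict Char Int) (hg : pvGood d)
    (h : ∀ c ∈ t, (t.count c : Int) ≤ d.getD c 0) :
    ∃ d', pvPassA t d = some d' ∧ pvGood d' ∧ ∀ c, d'.getD c 0 = d.getD c 0 - t.count c := by
  induction t generalizing d with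
  | nil => exact ⟨d, rfl, hg, by simp⟩
  | cons c rest ih =>
    have hc1 := h c (by simp)
    rw [List.count_cons_self] at hc1
    push_cast at hc1
    have hcpos : 0 < d.getD c 0 := by omega
    have hv : d.get? c = some (d.getD c 0) := pvGood_get?_of_pos hg hcpos
    set v := d.getD c 0 with hvdef
    have hgd2 := pvStep_good hg hv
    set d2 := (if v - 1 = 0 then d.erase c else d.insert c (v - 1)) with hd2
    have hd2getD : ∀ a, d2.getD a 0 = if a = c then v - 1 else d.getD a 0 := pvStep_getD v
    have hrest : ∀ a ∈ rest, ((rest.count a : Int)) ≤ d2.getD a 0 := by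
      intro a ha
      rw [hd2getD a]
      have hta := h a (by simp [ha])
      by_cases hac : a = c
      · subst hac
        rw [List.count_cons_self] at hta
        push_cast at hta
        simp only [if_pos rfl]
        omega
      · rw [if_neg hac]
        have hca : ¬ c = a := fun hh => hac hh.symm
        simp only [List.count_cons, beq_iff_eq, if_neg hca, Nat.add_zero] at hta
        exact hta
    obtain ⟨d', hpass, hgd', hgetD⟩ := ih d2 hgd2 hrest
    refine ⟨d', ?_, hgd', ?_⟩
    · simp [pvPassA, hv, ← hd2, hpass]
    · intro a
      rw [hgetD a, hd2getD a]
      by_cases hac : a = c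
      · subst hac
        rw [List.count_cons_self]
        simp only [if_pos rfl]
        push_cast
        omega
      · rw [if_neg hac]
        have hca : ¬ c = a := fun hh => hac hh.symm
        simp only [List.count_cons, beq_iff_eq, if_neg hca, Nat.add_zero]

theorem pvPassA_none (t : List Char) (d : PySem.Dict Char Int) (hg : pvGood d)
    (c₀ : Char) (hc : c₀ ∈ t) (h : d.getD c₀ 0 < (t.count c₀ : Int)) :
    pvPassA t d = none := by
  induction t generalizing d with
  | nil => simp at hc
  | cons c rest ih =>
    cases hv : d.get? c with
    | none => simp [pvPassA, hv]
    | some v =>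
      have hveq : v = d.getD c 0 := by simp [PySem.Dict.getD, hv]
      have hvpos : 0 < v := hg c v hv
      have hgd2 := pvStep_good hg hv
      set d2 := (if v - 1 = 0 then d.erase c else d.insert c (v - 1)) with hd2
      have hd2getD : ∀ a, d2.getD a 0 = if a = c then v - 1 else d.getD a 0 := pvStep_getD v
      have hnext : c₀ ∈ rest ∧ d2.getD c₀ 0 < ((rest.count c₀ : Int)) := by
        by_cases hcc : c₀ = c
        · subst hcc
          rw [List.count_cons_self] at h
          push_cast at h
          have hmem : c₀ ∈ rest := by
            rw [← List.count_pos_iff]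
            omega
          refine ⟨hmem, ?_⟩
          rw [hd2getD c₀, if_pos rfl]
          omega
        · have hmem : c₀ ∈ rest := by
            cases hc with
            | head => exact absurd rfl hcc
            | tail _ h' => exact h'
          refine ⟨hmem, ?_⟩
          rw [hd2getD c₀, if_neg hcc]
          have hcc' : ¬ c = c₀ := fun hh => hcc hh.symm
          simp only [List.count_cons, beq_iff_eq, if_neg hcc', Nat.add_zero] at h
          exact h
      have := ih d2 hgd2 hnext.1 hnext.2
      simp [pvPassA, hv, ← hd2, this]

theorem pvLoopA_eq (fuel : Nat) (t : List Char) (d : PySem.Dict Char Int) (acc m : Int)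
    (hg : pvGood d)
    (hmem : ∃ c ∈ t, m = d.getD c 0 / (t.count c : Int))
    (hle : ∀ c ∈ t, m ≤ d.getD c 0 / (t.count c : Int))
    (hfuel : m < (fuel : Int)) :
    pvLoopA fuel t d acc = acc + m := by
  induction fuel generalizing d acc m with
  | zero =>
    obtain ⟨c₀, hc₀, hm⟩ := hmem
    have : (0:Int) ≤ m := by
      rw [hm]
      exact Int.ediv_nonneg (pvGood_getD_nonneg hg c₀)
        (by positivity)
    simp at hfuel
    omega
  | succ fuel ih =>
    obtain ⟨c₀, hc₀, hm⟩ := hmem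
    have hcnt₀ : (0:Int) < (t.count c₀ : Int) := by
      have := List.count_pos_iff.mpr hc₀
      exact_mod_cast this
    have hm0 : (0:Int) ≤ m := hm ▸ Int.ediv_nonneg (pvGood_getD_nonneg hg c₀) (le_of_lt hcnt₀)
    by_cases hall : ∀ c ∈ t, (t.count c : Int) ≤ d.getD c 0
    · -- a full pass succeeds
      obtain ⟨d', hpass, hgd', hgetD⟩ := pvPassA_some t d hg hall
      have hm1 : (1:Int) ≤ m := by
        rw [hm, Int.le_ediv_iff_mul_le hcnt₀] at *
        have := hall c₀ hc₀
        calc (1:Int) * (t.count c₀ : Int) = (t.count c₀ : Int) := one_mul _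
        _ ≤ d.getD c₀ 0 := this
      have hstep : ∀ c ∈ t, d'.getD c 0 / (t.count c : Int)
          = d.getD c 0 / (t.count c : Int) - 1 := by
        intro c hcmem
        have hcnt : (0:Int) < (t.count c : Int) := by
          exact_mod_cast List.count_pos_iff.mpr hcmem
        rw [hgetD c]
        have : d.getD c 0 - (t.count c : Int)
            = d.getD c 0 + (-1) * (t.count c : Int) := by ring
        rw [this, Int.add_mul_ediv_right _ _ (ne_of_gt hcnt)]
        ring
      have := ih d' (acc + 1) (m - 1) hgd'
        ⟨c₀, hc₀, by rw [hstep c₀ hc₀, hm]⟩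
        (fun c hcm => by rw [hstep c hcm]; have := hle c hcm; omega)
        (by push_cast at hfuel ⊢; omega)
      simp only [pvLoopA, hpass]
      rw [this]
      ring
    · -- the pass fails: m = 0 and the loop returns acc
      push_neg at hall
      obtain ⟨c₁, hc₁, hlt⟩ := hall
      have hpass := pvPassA_none t d hg c₁ hc₁ hlt
      have hz : d.getD c₁ 0 / (t.count c₁ : Int) = 0 :=
        Int.ediv_eq_zero_of_lt (pvGood_getD_nonneg hg c₁) hlt
      have : m ≤ 0 := by have := hle c₁ hc₁; omega
      have hmz : m = 0 := le_antisymm this hm0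
      simp only [pvLoopA, hpass]
      omega

theorem pvGood_counter (l : List Char) : pvGood (PySem.Dict.counter l) := by
  intro c v hv
  rw [PySem.Dict.get?_eq_some_iff_mem_items _ _ _ (PySem.Dict.nodup_keys_counter l),
    PySem.Dict.items_counter] at hv
  obtain ⟨k, hk, hkv⟩ := List.mem_map.mp hv
  rw [Prod.mk.injEq] at hkv
  obtain ⟨rfl, rfl⟩ := hkv
  have : k ∈ l := (PySem.Set.mem_ofList l k).mp hk
  exact_mod_cast List.count_pos_iff.mpr this

theorem solution_eq (t l : String) (hpre : t ≠ "") :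
    solution t l = solution_alt t l := by
  have htl : t.toList ≠ [] := by
    intro hn; apply hpre; cases t; simp at hn; simp [hn]
  cases hset : PySem.Set.ofList t.toList with
  | nil =>
    exfalso
    obtain ⟨c, hc⟩ := List.exists_mem_of_ne_nil _ htl
    have := (PySem.Set.mem_ofList t.toList c).mpr hc
    rw [hset] at this
    simp at this
  | cons c0 cs =>
    set f : Char → Int := fun c =>
      PySem.Int.floordiv (l.toList.count c : Int) (t.toList.count c : Int) with hf
    set m : Int := (cs.map f).foldl min (f c0) with hmdef
    have hal : solution_alt t l = m := by
      simp only [solution_alt, hset, List.map_cons, ← hf, ← hmdef]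
    have hmin : ((c0 :: cs).map f).min? = some m := by
      rw [List.map_cons]; rfl
    obtain ⟨hmemq, hleq⟩ := List.min?_eq_some_iff.mp hmin
    -- characterise f on members of t
    have hfc : ∀ c ∈ t.toList,
        f c = (PySem.Dict.counter l.toList).getD c 0 / (t.toList.count c : Int) := by
      intro c hc
      have hcnt : (0:Int) < (t.toList.count c : Int) := by
        exact_mod_cast List.count_pos_iff.mpr hc
      rw [hf]
      simp only [PySem.Dict.getD_counter]
      exact PySem.Int.floordiv_eq_ediv_of_pos hcnt
    have hmemt : ∀ c, c ∈ (c0 :: cs) → c ∈ t.toList := by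
      intro c hc
      rw [← hset] at hc
      exact (PySem.Set.mem_ofList t.toList c).mp hc
    obtain ⟨c₀, hc₀m, hfc₀⟩ := List.mem_map.mp hmemq
    have hc₀t : c₀ ∈ t.toList := hmemt c₀ hc₀m
    have hmem : ∃ c ∈ t.toList,
        m = (PySem.Dict.counter l.toList).getD c 0 / (t.toList.count c : Int) := by
      exact ⟨c₀, hc₀t, by rw [← hfc c₀ hc₀t, hfc₀]⟩
    have hle : ∀ c ∈ t.toList,
        m ≤ (PySem.Dict.counter l.toList).getD c 0 / (t.toList.count c : Int) := by
      intro c hc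
      rw [← hfc c hc]
      apply hleq
      apply List.mem_map.mpr
      refine ⟨c, ?_, rfl⟩
      rw [← hset]
      exact (PySem.Set.mem_ofList t.toList c).mpr hc
    have hfuel : m < ((l.toList.length + 1 : Nat) : Int) := by
      have h1 : m ≤ f c₀ := le_of_eq hfc₀.symm
      have h2 : f c₀ ≤ (l.toList.count c₀ : Int) := by
        rw [hfc c₀ hc₀t, PySem.Dict.getD_counter]
        exact Int.ediv_le_self _ (by positivity)
      have h3 : (l.toList.count c₀ : Int) ≤ (l.toList.length : Int) := by
        exact_mod_cast List.count_le_length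
      push_cast
      omega
    have hA : solution t l
        = 0 + m := by
      simp only [solution, pvBuildCounter, PySem.Dict.foldl_insert_getD_add_one_eq_counter]
      exact pvLoopA_eq _ _ _ _ _ (pvGood_counter l.toList) hmem hle hfuel
    rw [hA, hal]
    ring

-- ===== VERDICT (by name: the statement is the Claim_ definition above) =====
theorem solution_spec : Claim_equal_solution := by
  intro target_str letters_to_use _ hpre
  unfold Spec_solution
  exact solution_eq target_str letters_to_use hpre
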